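-- pv_equiv track=rewrite | github.com/Diassia/Code-Wars-Practice | repeat_string_upper_lower.py | repeat_string
-- ===== SOURCE A (Python) =====
-- def repeat_string(num_string, position): # maybe include reverse option for flipped rules
--     converted_string = ''
--     number_position = position
--     lowercase = True
--     string_to_repeat = num_string # string
--
--     while number_position > len(converted_string):
--         if lowercase == True:
--             converted_string += num_string
--             lowercase = False
--         else:
--             converted_string += (string_to_repeat).upper()
--             lowercase = True
--
--     sliced_string = converted_string[:position]
--
--     return sliced_string
-- ===== SOURCE B (Python) =====
-- def repeat_string(num_string, position):
--     if position <= 0: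
--         return ''
--     period = num_string + num_string.upper()
--     repeats = position // len(period) + 1
--     return (period * repeats)[:position]
-- ===== Notes on version B (the rewrite author's own statement) =====
-- stated objective: simpler
-- what changed: Replaces the append-until-long-enough loop over an alternating-case state with a closed form: build the two-block period num_string + num_string.upper() once, repeat it position//len(period)+1 times by string multiplication and slice to position.
import Mathlib
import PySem

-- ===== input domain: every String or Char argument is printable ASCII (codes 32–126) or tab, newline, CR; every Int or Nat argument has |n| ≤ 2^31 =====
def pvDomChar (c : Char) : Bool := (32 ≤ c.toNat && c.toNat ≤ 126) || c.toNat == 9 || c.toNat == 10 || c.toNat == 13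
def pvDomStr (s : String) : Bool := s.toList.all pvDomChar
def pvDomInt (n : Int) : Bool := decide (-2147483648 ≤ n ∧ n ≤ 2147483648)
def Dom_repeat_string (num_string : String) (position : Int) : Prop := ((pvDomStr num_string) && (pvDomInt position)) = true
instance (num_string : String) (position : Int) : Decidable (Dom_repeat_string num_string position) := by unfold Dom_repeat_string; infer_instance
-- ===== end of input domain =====

-- B replaces A's append-until-long-enough alternating-case loop by a closed form:
-- build the period num_string + num_string.upper() once, repeat it position//len(period)+1
-- times and slice to position (objective: simpler; equal wherever A terminates).


-- ===== PORT A =====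
-- A's while loop, on List Char.  `fuel` only bounds the number of passes: each pass
-- appends at least one character when num_string ≠ '', so position.toNat + 1 passes
-- always suffice inside Pre_; the Python loop diverges exactly where Pre_ fails.
def repeatStringLoop (s : List Char) (position : Int) : Nat → List Char → Bool → List Char
  | 0, acc, _ => acc
  | fuel + 1, converted, lowercase =>
    if (converted.length : Int) < position then
      if lowercase then
        repeatStringLoop s position fuel (converted ++ s) false
      else
        repeatStringLoop s position fuel (converted ++ PySem.Chars.upper s) true
    else converted

def repeat_string (num_string : String) (position : Int) : String :=
  String.ofList (PySem.List.slice
    (repeatStringLoop num_string.toList position (position.toNat + 1) [] true)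
    none (some position))

-- ===== PORT B =====
def repeat_string_alt (num_string : String) (position : Int) : String :=
  if position ≤ 0 then "" else
    String.ofList (PySem.List.slice
      (List.flatten (List.replicate
        (PySem.Int.floordiv position (((num_string.toList ++ PySem.Chars.upper num_string.toList).length : Nat) : Int) + 1).toNat
        (num_string.toList ++ PySem.Chars.upper num_string.toList)))
      none (some position))

-- ===== PRECONDITION & SPEC =====
-- Pre_ excludes exactly num_string = '' with position > 0: there A's while loop makes no
-- progress and the Python A diverges (A returns a value on every other input).
def Pre_repeat_string (num_string : String) (position : Int) : Prop :=
  position ≤ 0 ∨ num_string ≠ ""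
instance (num_string : String) (position : Int) : Decidable (Pre_repeat_string num_string position) := by unfold Pre_repeat_string; infer_instance

def pvWitness_repeat_string : String × Int := ("ab", 7)

def Spec_repeat_string (num_string : String) (position : Int) (out : String) : Prop := out = repeat_string_alt num_string position
instance (num_string : String) (position : Int) (out : String) : Decidable (Spec_repeat_string num_string position out) := by unfold Spec_repeat_string; infer_instance

-- ===== CLAIM (what is proved, stated in full; the proofs are below) =====
def Claim_equal_repeat_string : Prop := ∀ (num_string : String) (position : Int), Dom_repeat_string num_string position → Pre_repeat_string num_string position → Spec_repeat_string num_string position (repeat_string num_string position)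

-- ===== LEMMAS AND PROOFS =====

-- P repeated m times
def pvRep (P : List Char) (m : Nat) : List Char := List.flatten (List.replicate m P)

theorem pvRep_succ (P : List Char) (m : Nat) : pvRep P (m + 1) = pvRep P m ++ P := by
  simp [pvRep, List.replicate_add, List.flatten_append]

theorem pvRep_prefix (P : List Char) {a b : Nat} (h : a ≤ b) : pvRep P a <+: pvRep P b := by
  obtain ⟨d, rfl⟩ := Nat.exists_eq_add_of_le h
  simp only [pvRep, List.replicate_add, List.flatten_append]
  exact List.prefix_append _ _

theorem pvRep_length (P : List Char) (m : Nat) : (pvRep P m).length = m * P.length := by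
  simp [pvRep]

theorem pvUpper_length (L : List Char) : (PySem.Chars.upper L).length = L.length := by
  simp [PySem.Chars.upper]

theorem pvTakePrefix (l L : List Char) (t : Nat) (h : l <+: L) (ht : t ≤ l.length) :
    l.take t = L.take t := by
  obtain ⟨r, rfl⟩ := h
  rw [List.take_append_of_le_length ht]

/-- Loop invariant: from a state `pvRep P k` (next block lowercase) or `pvRep P k ++ L`
    (next block uppercase), with enough fuel, the loop result has length ≥ position and
    is a prefix of some `pvRep P m`, where `P = L ++ upper L`. -/
theorem repeatStringLoop_spec (L : List Char) (hL : L ≠ []) (position : Int) :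
    ∀ (fuel : Nat) (acc : List Char) (lc : Bool),
      (∃ k, acc = if lc then pvRep (L ++ PySem.Chars.upper L) k
                  else pvRep (L ++ PySem.Chars.upper L) k ++ L) →
      position ≤ (acc.length : Int) + (fuel : Int) →
      position ≤ ((repeatStringLoop L position fuel acc lc).length : Int) ∧
      ∃ m, repeatStringLoop L position fuel acc lc <+: pvRep (L ++ PySem.Chars.upper L) m := by
  have hLpos : 0 < L.length := List.length_pos_iff.mpr hL
  intro fuel
  induction fuel with
  | zero =>
    intro acc lc ⟨k, hk⟩ hle
    refine ⟨by simpa using hle, k + 1, ?_⟩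
    cases lc <;> simp only [if_true, if_false, Bool.false_eq_true] at hk <;> subst hk <;>
      simp only [repeatStringLoop]
    · rw [pvRep_succ, ← List.append_assoc]
      exact (List.prefix_append _ _)
    · exact pvRep_prefix _ (Nat.le_succ k)
  | succ fuel ih =>
    intro acc lc ⟨k, hk⟩ hle
    simp only [repeatStringLoop]
    by_cases hc : (acc.length : Int) < position
    · rw [if_pos hc]
      cases lc
      · -- uppercase branch: acc = pvRep k ++ L, append upper L to complete the period
        simp only [Bool.false_eq_true, if_false] at hk
        subst hk
        have hnew : (pvRep (L ++ PySem.Chars.upper L) k ++ L) ++ PySem.Chars.upper L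
            = pvRep (L ++ PySem.Chars.upper L) (k + 1) := by
          rw [pvRep_succ, List.append_assoc]
        rw [hnew]
        refine ih _ true ⟨k + 1, by simp⟩ ?_
        have : L.length ≤ (pvRep (L ++ PySem.Chars.upper L) (k + 1)).length := by
          rw [pvRep_succ]
          simp [List.length_append]
          omega
        push_cast at hle ⊢
        have hul := pvUpper_length L
        simp [pvRep_succ, List.length_append, hul] at *
        omega
      · -- lowercase branch: acc = pvRep k, append L
        simp only [if_true] at hk
        subst hk
        refine ih _ false ⟨k, by simp⟩ ?_
        push_cast at hle ⊢
        simp [List.length_append] at *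
        omega
    · rw [if_neg hc]
      refine ⟨by omega, k + 1, ?_⟩
      cases lc <;> simp only [if_true, if_false, Bool.false_eq_true] at hk <;> subst hk
      · rw [pvRep_succ, ← List.append_assoc]
        exact List.prefix_append _ _
      · exact pvRep_prefix _ (Nat.le_succ k)

theorem pvToList_ne_nil (s : String) (h : s ≠ "") : s.toList ≠ [] := by
  intro hnil
  apply h
  cases s
  simp_all

-- ===== VERDICT (by name: the statement is the Claim_ definition above) =====
theorem repeat_string_spec : Claim_equal_repeat_string := by
  unfold Claim_equal_repeat_string Spec_repeat_string
  intro s pos _ hpre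
  unfold repeat_string repeat_string_alt
  by_cases hp : pos ≤ 0
  · -- loop not entered; both return ''
    have h0 : repeatStringLoop s.toList pos (pos.toNat + 1) [] true = [] := by
      simp only [repeatStringLoop]
      rw [if_neg (by simp; omega)]
    rw [h0, if_pos hp]
    simp [PySem.List.slice, PySem.List.clampIdx]
  · rw [not_le] at hp
    rw [if_neg (by omega)]
    have hL : s.toList ≠ [] := by
      rcases hpre with h | h
      · omega
      · exact pvToList_ne_nil s h
    have hLpos : 0 < s.toList.length := List.length_pos_iff.mpr hL
    obtain ⟨hlen, m, hpref⟩ :=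
      repeatStringLoop_spec s.toList hL pos (pos.toNat + 1) [] true
        ⟨0, by simp [pvRep]⟩ (by push_cast; omega)
    set L := s.toList with hLdef
    set P := L ++ PySem.Chars.upper L with hPdef
    set r := repeatStringLoop L pos (pos.toNat + 1) [] true with hrdef
    have hn : 0 < (P.length : Int) := by
      simp [hPdef, List.length_append]
      omega
    set q := PySem.Int.floordiv pos (P.length : Int) with hqdef
    have hq0 : 0 ≤ q := by
      by_contra hneg
      rw [not_le] at hneg
      have hmul := PySem.Int.floordiv_mul_add_mod pos (P.length : Int)
      have hm0 := PySem.Int.mod_nonneg (a := pos) (b := (P.length : Int)) hn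
      have hml := PySem.Int.mod_lt (a := pos) (b := (P.length : Int)) hn
      rw [← hqdef] at hmul
      nlinarith
    have hposle : pos ≤ (q + 1) * (P.length : Int) := by
      have hmul := PySem.Int.floordiv_mul_add_mod pos (P.length : Int)
      have hml := PySem.Int.mod_lt (a := pos) (b := (P.length : Int)) hn
      rw [← hqdef] at hmul
      nlinarith
    -- both sides are take pos.toNat of a common repetition of P
    rw [PySem.List.slice_to _ (by omega : (0:Int) ≤ pos),
        PySem.List.slice_to _ (by omega : (0:Int) ≤ pos)]
    have hrepB : List.flatten (List.replicate (q + 1).toNat P) = pvRep P (q + 1).toNat := rfl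
    rw [hrepB]
    have hM1 : m ≤ max m (q + 1).toNat := le_max_left _ _
    have hM2 : (q + 1).toNat ≤ max m (q + 1).toNat := le_max_right _ _
    have h1 : r.take pos.toNat = (pvRep P (max m (q + 1).toNat)).take pos.toNat := by
      refine pvTakePrefix _ _ _ (hpref.trans (pvRep_prefix P hM1)) ?_
      omega
    have h2 : (pvRep P (q + 1).toNat).take pos.toNat
        = (pvRep P (max m (q + 1).toNat)).take pos.toNat := by
      refine pvTakePrefix _ _ _ (pvRep_prefix P hM2) ?_
      rw [pvRep_length]
      have : pos ≤ ((q + 1).toNat * P.length : Nat) := by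
        push_cast
        calc pos ≤ (q + 1) * (P.length : Int) := hposle
        _ = ((q + 1).toNat : Int) * (P.length : Int) := by rw [Int.toNat_of_nonneg (by omega)]
      omega
    rw [h1, h2]
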